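-- pv_equiv track=rewrite | github.com/MohamedSuwan/Codewars | Numbers of Letters of Numbers.py | numbers_of_letters
-- ===== SOURCE A (Python) =====
-- w={
-- 0:"zero",
-- 1:"one",
-- 2:"two",
-- 3:"three",
-- 4:"four",
-- 5:"five",
-- 6:"six",
-- 7:"seven",
-- 8:"eight",
-- 9:"nine",
-- }
--
-- def numbers_of_letters(n):
--     l=[]
--     word=""
--
--     while True:
--         for i in (str(n)):
--             word+=w[int(i)]
--         if n==4:
--             l.append(word)
--             break
--         else:
--             n=len(word)
--             l.append(word)
--             word=""
--     return (l)
-- ===== SOURCE B (Python) =====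
-- W = ["zero", "one", "two", "three", "four",
--      "five", "six", "seven", "eight", "nine"]
--
-- def spell(m):
--     # spell m digit by digit, purely arithmetically (no str/int round-trip)
--     if m < 10:
--         return W[m]
--     return spell(m // 10) + W[m % 10]
--
-- def numbers_of_letters(n):
--     word = spell(n)
--     if n == 4:
--         return [word]
--     return [word] + numbers_of_letters(len(word))
-- ===== Notes on version B (the rewrite author's own statement) =====
-- stated objective: alternative
-- what changed: A converts n to a string and maps each digit character through a dict inside a while-loop with list/word accumulators; B never touches str(n): it spells by arithmetic divmod recursion over the digits (indexing a word list) and builds the chain by direct recursion, consing front-to-back.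
import Mathlib
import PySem

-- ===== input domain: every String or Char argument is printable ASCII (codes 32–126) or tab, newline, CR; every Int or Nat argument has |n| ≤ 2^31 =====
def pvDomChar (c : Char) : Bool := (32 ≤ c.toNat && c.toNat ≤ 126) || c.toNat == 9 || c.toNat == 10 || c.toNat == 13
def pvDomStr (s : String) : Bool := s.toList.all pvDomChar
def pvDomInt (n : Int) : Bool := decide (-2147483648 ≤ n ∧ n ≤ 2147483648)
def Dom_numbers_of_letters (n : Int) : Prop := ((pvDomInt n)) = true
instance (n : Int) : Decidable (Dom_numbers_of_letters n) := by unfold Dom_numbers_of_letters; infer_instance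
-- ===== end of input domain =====

-- B replaces A's str(n)+dict+while-loop by arithmetic divmod spelling and chain recursion (objective: alternative); same return values.

-- ===== PORT A =====
-- the module-level dict w
def pvW : PySem.Dict Int String :=
  PySem.Dict.ofList [(0, "zero"), (1, "one"), (2, "two"), (3, "three"), (4, "four"),
                     (5, "five"), (6, "six"), (7, "seven"), (8, "eight"), (9, "nine")]

-- one digit character of A: w[int(i)].  int(i) → PySem.Int.ofStr?, dict lookup → get?;
-- the `.getD ""` totalizes the ValueError case (reached only for n < 0, outside Pre_).
def pvDigitWord (c : Char) : String :=
  (((PySem.Int.ofStr? (String.ofList [c])).bind (fun k => pvW.get? k)).getD "")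

-- A's inner loop `for i in str(n): word += w[int(i)]`
def pvSpellA (n : Int) (word : String) : String :=
  (PySem.Int.toChars n).foldl (fun w c => w ++ pvDigitWord c) word

-- A's `while True` loop; fuel only makes the loop total (32 is far beyond the chain length on the domain)
def pvLoopA : Nat → Int → List String → List String
  | 0, _, l => l
  | fuel + 1, n, l =>
    let word := pvSpellA n ""
    if n == 4 then l ++ [word]
    else pvLoopA fuel (PySem.Str.len (pvSpellA n "")) (l ++ [word])

def numbers_of_letters (n : Int) : List String := pvLoopA 32 n []

-- ===== PORT B =====
-- the module-level list W of Source B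
def pvWordsB : List String :=
  ["zero", "one", "two", "three", "four", "five", "six", "seven", "eight", "nine"]

-- spell(m): arithmetic divmod recursion; W[m] → pyGetD (the default "" is never
-- consulted for 0 ≤ m < 10; negative m, where Python wraps, lies outside Pre_)
def pvSpellB (m : Int) : String :=
  if m < 10 then PySem.List.pyGetD pvWordsB m ""
  else pvSpellB (PySem.Int.floordiv m 10) ++ PySem.List.pyGetD pvWordsB (PySem.Int.mod m 10) ""
termination_by m.toNat
decreasing_by
  have := PySem.Int.floordiv_eq_ediv_of_pos (a := m) (b := 10) (by omega)
  omega

-- the chain recursion of Source B; same fuel guard for totality as A's loop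
def pvRecB : Nat → Int → List String
  | 0, _ => []
  | fuel + 1, n =>
    let word := pvSpellB n
    if n == 4 then [word]
    else word :: pvRecB fuel (PySem.Str.len word)

def numbers_of_letters_alt (n : Int) : List String := pvRecB 32 n

-- ===== PRECONDITION & SPEC =====
-- On negative inputs A raises ValueError (int('-') on the sign character); Pre_ excludes exactly those inputs.
def Pre_numbers_of_letters (n : Int) : Prop := 0 ≤ n
instance (n : Int) : Decidable (Pre_numbers_of_letters n) := by unfold Pre_numbers_of_letters; infer_instance
def pvWitness_numbers_of_letters : Int := (7)

def Spec_numbers_of_letters (n : Int) (out : List String) : Prop := out = numbers_of_letters_alt n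
instance (n : Int) (out : List String) : Decidable (Spec_numbers_of_letters n out) := by unfold Spec_numbers_of_letters; infer_instance

-- ===== CLAIM (what is proved, stated in full; the proofs are below) =====
def Claim_equal_numbers_of_letters : Prop := ∀ (n : Int), Dom_numbers_of_letters n → Pre_numbers_of_letters n → Spec_numbers_of_letters n (numbers_of_letters n)

-- ===== LEMMAS AND PROOFS =====

-- reference digit-character list of a natural number, most significant first
def pvCharsOf (n : Nat) : List Char :=
  if n < 10 then [Nat.digitChar n]
  else pvCharsOf (n / 10) ++ [Nat.digitChar (n % 10)]
decreasing_by exact Nat.div_lt_self (by omega) (by omega)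

-- core's fuel-based toDigitsCore equals the structural recursion, given enough fuel
theorem pv_toDigitsCore_eq (fuel : Nat) :
    ∀ (n : Nat) (ds : List Char), n < fuel →
      Nat.toDigitsCore 10 fuel n ds = pvCharsOf n ++ ds := by
  induction fuel with
  | zero => intro n ds h; omega
  | succ fuel ih =>
      intro n ds h
      rw [Nat.toDigitsCore]
      by_cases h10 : n < 10
      · have : n / 10 = 0 := Nat.div_eq_of_lt h10
        simp [this, pvCharsOf, h10, Nat.mod_eq_of_lt h10]
      · have hne : n / 10 ≠ 0 := by
          intro h0; exact h10 (by omega)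
        have hlt : n / 10 < fuel := by
          have := Nat.div_lt_self (n := n) (show 0 < n by omega) (show 1 < 10 by norm_num)
          omega
        simp only [hne, if_false]
        rw [ih (n / 10) _ hlt]
        conv_rhs => rw [pvCharsOf, if_neg h10]
        simp

theorem pv_toDigits_eq (n : Nat) : Nat.toDigits 10 n = pvCharsOf n := by
  have := pv_toDigitsCore_eq (n + 1) n [] (by omega)
  simpa [Nat.toDigits] using this

-- A's dict lookup on a digit character agrees with B's list indexing
theorem pv_digitWord_eq (d : Nat) (h : d < 10) :
    pvDigitWord (Nat.digitChar d) = PySem.List.pyGetD pvWordsB (d : Int) "" := by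
  interval_cases d <;> decide

-- hoisting the accumulator out of A's word-building fold
theorem pv_foldl_hoist (cs : List Char) :
    ∀ (w : String), cs.foldl (fun w c => w ++ pvDigitWord c) w
      = w ++ cs.foldl (fun w c => w ++ pvDigitWord c) "" := by
  induction cs with
  | nil => intro w; simp
  | cons c cs ih =>
      intro w
      simp only [List.foldl_cons]
      rw [ih (w ++ pvDigitWord c), ih ("" ++ pvDigitWord c)]
      apply String.ext; simp

-- A's fold over the decimal characters equals B's arithmetic spelling
theorem pv_spell_nat (n : Nat) :
    (pvCharsOf n).foldl (fun w c => w ++ pvDigitWord c) "" = pvSpellB (n : Int) := by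
  induction n using Nat.strong_induction_on with
  | _ n ih =>
      by_cases h10 : n < 10
      · rw [pvCharsOf, if_pos h10, pvSpellB]
        have : ((n : Int)) < 10 := by exact_mod_cast h10
        rw [if_pos this]
        simp [pv_digitWord_eq n h10]
      · rw [pvCharsOf, if_neg h10, List.foldl_append, pv_foldl_hoist, pvSpellB]
        have hnlt : ¬ ((n : Int) < 10) := by exact_mod_cast h10
        rw [if_neg hnlt]
        have hdiv : PySem.Int.floordiv (n : Int) 10 = ((n / 10 : Nat) : Int) :=
          PySem.Int.floordiv_natCast n 10
        have hmod : PySem.Int.mod (n : Int) 10 = ((n % 10 : Nat) : Int) :=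
          PySem.Int.mod_natCast n 10
        rw [hdiv, hmod, ← ih (n / 10) (Nat.div_lt_self (by omega) (by norm_num))]
        simp [pv_digitWord_eq (n % 10) (Nat.mod_lt n (by norm_num))]

theorem pv_spell_eq (n : Int) (h : 0 ≤ n) : pvSpellA n "" = pvSpellB n := by
  unfold pvSpellA
  rw [show PySem.Int.toChars n = Nat.toDigits 10 n.toNat by
        simp [PySem.Int.toChars, not_lt.mpr h]]
  rw [pv_toDigits_eq]
  have := pv_spell_nat n.toNat
  rwa [Int.toNat_of_nonneg h] at this

theorem pv_loop_eq (fuel : Nat) :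
    ∀ (n : Int) (l : List String), 0 ≤ n → pvLoopA fuel n l = l ++ pvRecB fuel n := by
  induction fuel with
  | zero => intro n l _; simp [pvLoopA, pvRecB]
  | succ fuel ih =>
      intro n l hn
      simp only [pvLoopA, pvRecB, pv_spell_eq n hn]
      by_cases h : n == 4
      · simp [h]
      · have hlen : 0 ≤ PySem.Str.len (pvSpellB n) := by
          simp [PySem.Str.len_eq]
        rw [ih _ _ hlen]
        simp [h]

-- ===== VERDICT (by name: the statement is the Claim_ definition above) =====
theorem numbers_of_letters_spec : Claim_equal_numbers_of_letters := by
  intro n _ hpre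
  unfold Spec_numbers_of_letters numbers_of_letters numbers_of_letters_alt
  simpa using pv_loop_eq 32 n [] hpre
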